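-- pv_equiv track=rewrite | github.com/surajkumar5454/file-tracking-system | app/utils/hierarchy.py | get_superior_roles
-- ===== SOURCE A (Python) =====
-- ROLE_HIERARCHY = {
--     'BRANCH_DIARY': ['ESTATE_OFFICER'],
--     'ESTATE_OFFICER': ['BUDGET_OFFICER'],
--     'BUDGET_OFFICER': ['IFA'],
--     'IFA': ['EE'],
--     'EE': ['SE'],
--     'SE': ['DIG'],
--     'DIG': ['ADG'],
--     'ADG': ['DG'],
--     'DG': []  # Top of hierarchy
-- }
--
-- def get_superior_roles(role_name):
--     """Get all roles above this role in hierarchy"""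
--     if not role_name:
--         return []
--
--     role_name = role_name.upper()
--     superiors = []
--     current_role = role_name
--
--     while current_role in ROLE_HIERARCHY:
--         superior = ROLE_HIERARCHY[current_role]
--         if not superior:  # Reached top
--             break
--         superiors.extend(superior)
--         current_role = superior[0]
--
--     return superiors
-- ===== SOURCE B (Python) =====
-- ORDER = ['BRANCH_DIARY', 'ESTATE_OFFICER', 'BUDGET_OFFICER', 'IFA',
--          'EE', 'SE', 'DIG', 'ADG', 'DG']
--
-- def get_superior_roles(role_name):
--     """Get all roles above this role in hierarchy"""
--     if not role_name:
--         return []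
--     role = role_name.upper()
--     if role not in ORDER:
--         return []
--     return ORDER[ORDER.index(role) + 1:]
-- ===== Notes on version B (the rewrite author's own statement) =====
-- stated objective: idiomatic
-- what changed: Replaces the link-by-link while-loop walk over the parent dict with a single bottom-to-top list, one position lookup and a slice.
import Mathlib
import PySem

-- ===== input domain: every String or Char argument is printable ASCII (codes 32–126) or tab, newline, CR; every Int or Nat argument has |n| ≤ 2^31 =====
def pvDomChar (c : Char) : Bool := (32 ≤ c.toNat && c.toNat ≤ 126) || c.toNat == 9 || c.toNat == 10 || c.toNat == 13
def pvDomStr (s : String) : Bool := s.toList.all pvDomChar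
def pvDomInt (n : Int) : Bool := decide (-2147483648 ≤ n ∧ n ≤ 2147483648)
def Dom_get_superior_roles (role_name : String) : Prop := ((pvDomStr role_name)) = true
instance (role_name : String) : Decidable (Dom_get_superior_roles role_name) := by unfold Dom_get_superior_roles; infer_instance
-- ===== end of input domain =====

-- B replaces A's link-by-link while-loop walk over the parent dict with a single
-- bottom-to-top ordered list plus one position lookup and a slice (idiomatic; return value only).

-- ===== PORT A =====
def ROLE_HIERARCHY : PySem.Dict String (List String) :=
  PySem.Dict.mk
    [("BRANCH_DIARY", ["ESTATE_OFFICER"]),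
     ("ESTATE_OFFICER", ["BUDGET_OFFICER"]),
     ("BUDGET_OFFICER", ["IFA"]),
     ("IFA", ["EE"]),
     ("EE", ["SE"]),
     ("SE", ["DIG"]),
     ("DIG", ["ADG"]),
     ("ADG", ["DG"]),
     ("DG", [])]

-- the while loop of A; fuel 10 > the longest chain (9 links), so it never cuts the walk short
def getSuperiorLoop : Nat → String → List String → List String
  | 0, _, superiors => superiors
  | fuel + 1, current_role, superiors =>
    match PySem.Dict.get? ROLE_HIERARCHY current_role with
    | none => superiors                    -- current_role not in ROLE_HIERARCHY: loop exits
    | some superior =>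
      if superior = [] then superiors      -- reached top: break
      else getSuperiorLoop fuel (superior.headD "") (superiors ++ superior)

def get_superior_roles (role_name : String) : List String :=
  if role_name = "" then []
  else getSuperiorLoop 10 (PySem.Str.upper role_name) []

-- ===== PORT B =====
def ORDER : List String :=
  ["BRANCH_DIARY", "ESTATE_OFFICER", "BUDGET_OFFICER", "IFA", "EE", "SE", "DIG", "ADG", "DG"]

def get_superior_roles_alt (role_name : String) : List String :=
  if role_name = "" then []
  else
    match PySem.List.index? ORDER (PySem.Str.upper role_name) with
    | none => []
    | some i => PySem.List.slice ORDER (some ((i : Int) + 1)) none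

-- ===== PRECONDITION & SPEC =====
def Spec_get_superior_roles (role_name : String) (out : List String) : Prop := out = get_superior_roles_alt role_name
instance (role_name : String) (out : List String) : Decidable (Spec_get_superior_roles role_name out) := by unfold Spec_get_superior_roles; infer_instance

-- ===== CLAIM (what is proved, stated in full; the proofs are below) =====
def Claim_equal_get_superior_roles : Prop := ∀ (role_name : String), Dom_get_superior_roles role_name → Spec_get_superior_roles role_name (get_superior_roles role_name)

-- ===== LEMMAS AND PROOFS =====

-- both programs depend on role_name only through its uppercase form; this lemma compares them there
theorem core_eq (u : String) :
    getSuperiorLoop 10 u [] =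
      (match PySem.List.index? ORDER u with
       | none => []
       | some i => PySem.List.slice ORDER (some ((i : Int) + 1)) none) := by
  by_cases h1 : u = "BRANCH_DIARY"; · subst h1; decide
  by_cases h2 : u = "ESTATE_OFFICER"; · subst h2; decide
  by_cases h3 : u = "BUDGET_OFFICER"; · subst h3; decide
  by_cases h4 : u = "IFA"; · subst h4; decide
  by_cases h5 : u = "EE"; · subst h5; decide
  by_cases h6 : u = "SE"; · subst h6; decide
  by_cases h7 : u = "DIG"; · subst h7; decide
  by_cases h8 : u = "ADG"; · subst h8; decide
  by_cases h9 : u = "DG"; · subst h9; decide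
  -- u is none of the keys: A's loop exits at once, B's index lookup fails
  have hnotmem : u ∉ ORDER := by
    simp [ORDER, h1, h2, h3, h4, h5, h6, h7, h8, h9]
  have hidx : PySem.List.index? ORDER u = none :=
    (PySem.List.index?_eq_none_iff ORDER u).mpr hnotmem
  have hget : PySem.Dict.get? ROLE_HIERARCHY u = none := by
    simp [ROLE_HIERARCHY, PySem.Dict.get?]
    exact ⟨fun h => h1 h.symm, fun h => h2 h.symm, fun h => h3 h.symm, fun h => h4 h.symm,
           fun h => h5 h.symm, fun h => h6 h.symm, fun h => h7 h.symm, fun h => h8 h.symm,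
           fun h => h9 h.symm⟩
  rw [hidx]
  simp [getSuperiorLoop, hget]

-- ===== VERDICT (by name: the statement is the Claim_ definition above) =====
theorem get_superior_roles_spec : Claim_equal_get_superior_roles := by
  intro role_name _
  unfold Spec_get_superior_roles get_superior_roles get_superior_roles_alt
  by_cases he : role_name = ""
  · simp [he]
  · simp only [he, if_false]
    exact core_eq (PySem.Str.upper role_name)
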